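-- pv_equiv track=rewrite | github.com/SeoHyungjun/Coding_Test | baekjun/solved.ac/level/silver/silver3/행운의 티켓/행운의 티켓.py | solution
-- ===== SOURCE A (Python) =====
-- def is_same(arr):
--     return True if sum(arr[:len(arr)//2]) == sum(arr[len(arr)//2:]) else False
--
-- def solution(arr):
--     end = len(arr) - 1 if len(arr) & 1 else len(arr)
--
--     while end > 0:
--         i, answer = 0, 0
--
--         while i + end <= len(arr):
--             if is_same(arr[i:i+end]):
--                 answer = end
--                 return answer
--             i += 1
--         end -= 2
--     return 0
-- ===== SOURCE B (Python) =====
-- def solution(arr):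
--     n = len(arr)
--     P = [0]
--     s = 0
--     for x in arr:
--         s += x
--         P.append(s)
--     L = n if n % 2 == 0 else n - 1
--     while L > 0:
--         for i in range(n - L + 1):
--             if P[i + L // 2] - P[i] == P[i + L] - P[i + L // 2]:
--                 return L
--         L -= 2
--     return 0
-- ===== Notes on version B (the rewrite author's own statement) =====
-- stated objective: faster
-- what changed: B precomputes prefix sums once so each window's half-sum equality is checked in O(1) instead of slicing and summing the window each time.
import Mathlib
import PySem

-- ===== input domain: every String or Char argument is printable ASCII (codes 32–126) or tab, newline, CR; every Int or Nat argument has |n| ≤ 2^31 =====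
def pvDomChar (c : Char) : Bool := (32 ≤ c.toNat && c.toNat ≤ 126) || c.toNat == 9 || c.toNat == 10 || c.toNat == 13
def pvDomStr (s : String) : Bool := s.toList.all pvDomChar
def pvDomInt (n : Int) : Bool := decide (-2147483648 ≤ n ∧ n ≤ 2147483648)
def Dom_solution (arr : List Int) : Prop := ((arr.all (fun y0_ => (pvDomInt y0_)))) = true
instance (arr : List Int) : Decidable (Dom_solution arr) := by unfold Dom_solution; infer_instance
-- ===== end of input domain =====

-- B replaces A's per-window slice-and-sum (O(n^3)) with one prefix-sum pass and O(1) half-sum checks (O(n^2)).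

-- ===== PORT A =====
-- is_same(arr): sum(arr[:len//2]) == sum(arr[len//2:])  (slices with nonnegative in-range bounds = take/drop)
def isSame (arr : List Int) : Bool :=
  if (arr.take (arr.length / 2)).sum = (arr.drop (arr.length / 2)).sum then true else false

-- inner while loop of A: 'while i + end <= len(arr): if is_same(arr[i:i+end]): return end; i += 1'
def innerA (arr : List Int) (e : Nat) (i : Nat) : Option Nat :=
  if h : i + e ≤ arr.length then
    if isSame ((arr.drop i).take e) then some e
    else innerA arr e (i + 1)
  else none
termination_by arr.length + 1 - i
decreasing_by omega

-- outer while loop of A: 'while end > 0: … end -= 2'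
def outerA (arr : List Int) (e : Nat) : Int :=
  if e > 0 then
    match innerA arr e 0 with
    | some a => (a : Int)
    | none => outerA arr (e - 2)
  else 0
termination_by e
decreasing_by omega

def solution (arr : List Int) : Int :=
  outerA arr (if arr.length % 2 = 1 then arr.length - 1 else arr.length)

-- ===== PORT B =====
-- B's for loop with early return: any index i in range(n - L + 1) whose half sums agree
def outerB (P : List Int) (n : Nat) (L : Nat) : Int :=
  if L > 0 then
    if (List.range (n - L + 1)).any
        (fun i => P.getD (i + L / 2) 0 - P.getD i 0 == P.getD (i + L) 0 - P.getD (i + L / 2) 0) then (L : Int)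
    else outerB P n (L - 2)
  else 0
termination_by L
decreasing_by omega

def solution_alt (arr : List Int) : Int :=
  let n := arr.length
  -- 'P = [0]; s = 0; for x in arr: s += x; P.append(s)'
  let Ps := arr.foldl (fun (ps : List Int × Int) x => (ps.1 ++ [ps.2 + x], ps.2 + x)) ([0], 0)
  outerB Ps.1 n (if n % 2 = 0 then n else n - 1)

-- ===== PRECONDITION & SPEC =====
def Spec_solution (arr : List Int) (out : Int) : Prop := out = solution_alt arr
instance (arr : List Int) (out : Int) : Decidable (Spec_solution arr out) := by unfold Spec_solution; infer_instance

-- ===== CLAIM (what is proved, stated in full; the proofs are below) =====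
def Claim_equal_solution : Prop := ∀ (arr : List Int), Dom_solution arr → Spec_solution arr (solution arr)

-- ===== LEMMAS AND PROOFS =====

-- running prefix sums as a list
def psums (s : Int) : List Int → List Int
  | [] => []
  | x :: t => (s + x) :: psums (s + x) t

lemma foldl_buildP (l : List Int) : ∀ (P : List Int) (s : Int),
    l.foldl (fun (ps : List Int × Int) x => (ps.1 ++ [ps.2 + x], ps.2 + x)) (P, s)
      = (P ++ psums s l, s + l.sum) := by
  induction l with
  | nil => intro P s; simp [psums]
  | cons x t ih =>
    intro P s
    simp only [List.foldl_cons, ih, psums, List.sum_cons, Prod.mk.injEq]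
    exact ⟨by simp, by ring⟩

lemma psums_getD (l : List Int) : ∀ (s : Int) (k : Nat), k < l.length →
    (psums s l).getD k 0 = s + (l.take (k + 1)).sum := by
  induction l with
  | nil => intro s k hk; simp at hk
  | cons x t ih =>
    intro s k hk
    cases k with
    | zero => simp [psums]
    | succ j =>
      simp only [psums, List.getD_cons_succ, List.take_succ_cons, List.sum_cons]
      rw [ih (s + x) j (by simpa using hk)]
      ring

-- the prefix list built by B: P[k] = sum of the first k elements, for k ≤ n
lemma buildP_getD (arr : List Int) (k : Nat) (hk : k ≤ arr.length) :
    (arr.foldl (fun (ps : List Int × Int) x => (ps.1 ++ [ps.2 + x], ps.2 + x)) ([0], 0)).1.getD k 0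
      = (arr.take k).sum := by
  rw [foldl_buildP]
  cases k with
  | zero => simp
  | succ j =>
    have hj : j < arr.length := by omega
    simp only [List.cons_append, List.nil_append, List.getD_cons_succ]
    rw [psums_getD arr 0 j hj]
    simp

-- sum of a window in terms of prefix sums
lemma window_sum (arr : List Int) (i k : Nat) :
    ((arr.drop i).take k).sum = (arr.take (i + k)).sum - (arr.take i).sum := by
  rw [List.take_add, List.sum_append]
  ring

-- A's condition at index i equals B's prefix-sum condition, when the window fits
lemma cond_eq (arr : List Int) (e i : Nat) (hie : i + e ≤ arr.length) :
    isSame ((arr.drop i).take e)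
      = ((arr.take (i + e / 2)).sum - (arr.take i).sum
          == (arr.take (i + e)).sum - (arr.take (i + e / 2)).sum) := by
  have hlen : ((arr.drop i).take e).length = e := by
    simp [List.length_take, List.length_drop]; omega
  have h2 : e / 2 ≤ e := Nat.div_le_self e 2
  have htake : ((arr.drop i).take e).take (e / 2) = (arr.drop i).take (e / 2) := by
    rw [List.take_take]; congr 1; omega
  have hdrop : ((arr.drop i).take e).drop (e / 2) = (arr.drop (i + e / 2)).take (e - e / 2) := by
    rw [List.drop_take, List.drop_drop]
  unfold isSame
  rw [hlen, htake, hdrop, window_sum, window_sum]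
  have he : i + e / 2 + (e - e / 2) = i + e := by omega
  rw [he]
  split_ifs with h
  · exact (beq_iff_eq.mpr h).symm
  · exact ((Bool.not_eq_true _).mp (fun hb => h (beq_iff_eq.mp hb))).symm

-- innerA returns some e exactly when some index ≥ i fits and satisfies A's test
lemma innerA_some_iff (arr : List Int) (e : Nat) : ∀ (i : Nat),
    innerA arr e i = some e ↔
      ∃ j, i ≤ j ∧ j + e ≤ arr.length ∧ isSame ((arr.drop j).take e) = true := by
  intro i
  induction i using innerA.induct arr e with
  | case1 i hfit hsame =>
    rw [innerA, dif_pos hfit, if_pos hsame]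
    exact ⟨fun _ => ⟨i, le_refl i, hfit, hsame⟩, fun _ => rfl⟩
  | case2 i hfit hsame ih =>
    rw [innerA, dif_pos hfit, if_neg hsame, ih]
    constructor
    · rintro ⟨j, hij, hj, hc⟩; exact ⟨j, by omega, hj, hc⟩
    · rintro ⟨j, hij, hj, hc⟩
      refine ⟨j, ?_, hj, hc⟩
      rcases Nat.eq_or_lt_of_le hij with h | h
      · exfalso; rw [← h] at hc; exact absurd hc hsame
      · omega
  | case3 i hfit =>
    rw [innerA, dif_neg hfit]
    constructor
    · intro h; exact absurd h (by simp)
    · rintro ⟨j, hij, hj, _⟩; exfalso; omega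

lemma innerA_cases (arr : List Int) (e : Nat) : ∀ (i : Nat),
    innerA arr e i = some e ∨ innerA arr e i = none := by
  intro i
  induction i using innerA.induct arr e with
  | case1 i hfit hsame => left; rw [innerA]; simp [dif_pos hfit, hsame]
  | case2 i hfit hsame ih => rw [innerA]; simpa [dif_pos hfit, hsame] using ih
  | case3 i hfit => right; rw [innerA]; simp [dif_neg hfit]

-- B's any over range(n-L+1) matches the existence of a fitting index, for L ≤ n
lemma any_iff (arr : List Int) (e : Nat) (he : e ≤ arr.length) :
    ((List.range (arr.length - e + 1)).any
        (fun i => (arr.foldl (fun (ps : List Int × Int) x => (ps.1 ++ [ps.2 + x], ps.2 + x)) ([0], 0)).1.getD (i + e / 2) 0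
            - (arr.foldl (fun (ps : List Int × Int) x => (ps.1 ++ [ps.2 + x], ps.2 + x)) ([0], 0)).1.getD i 0
          == (arr.foldl (fun (ps : List Int × Int) x => (ps.1 ++ [ps.2 + x], ps.2 + x)) ([0], 0)).1.getD (i + e) 0
            - (arr.foldl (fun (ps : List Int × Int) x => (ps.1 ++ [ps.2 + x], ps.2 + x)) ([0], 0)).1.getD (i + e / 2) 0) = true)
      ↔ ∃ j, 0 ≤ j ∧ j + e ≤ arr.length ∧ isSame ((arr.drop j).take e) = true := by
  rw [List.any_eq_true]
  constructor
  · rintro ⟨i, hi, hc⟩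
    rw [List.mem_range] at hi
    have hie : i + e ≤ arr.length := by omega
    refine ⟨i, Nat.zero_le i, hie, ?_⟩
    rw [cond_eq arr e i hie]
    rwa [buildP_getD arr (i + e / 2) (by omega), buildP_getD arr i (by omega),
      buildP_getD arr (i + e) (by omega)] at hc
  · rintro ⟨j, _, hje, hc⟩
    refine ⟨j, by rw [List.mem_range]; omega, ?_⟩
    rw [buildP_getD arr (j + e / 2) (by omega), buildP_getD arr j (by omega),
      buildP_getD arr (j + e) (by omega)]
    rw [cond_eq arr e j hje] at hc
    exact hc

lemma outer_eq (arr : List Int) : ∀ (e : Nat), e ≤ arr.length →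
    outerA arr e
      = outerB (arr.foldl (fun (ps : List Int × Int) x => (ps.1 ++ [ps.2 + x], ps.2 + x)) ([0], 0)).1 arr.length e := by
  intro e
  induction e using Nat.strong_induction_on with
  | _ e ih =>
    intro he
    rw [outerA, outerB]
    by_cases hpos : e > 0
    · rw [if_pos hpos, if_pos hpos]
      by_cases hany : ((List.range (arr.length - e + 1)).any
          (fun i => (arr.foldl (fun (ps : List Int × Int) x => (ps.1 ++ [ps.2 + x], ps.2 + x)) ([0], 0)).1.getD (i + e / 2) 0
              - (arr.foldl (fun (ps : List Int × Int) x => (ps.1 ++ [ps.2 + x], ps.2 + x)) ([0], 0)).1.getD i 0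
            == (arr.foldl (fun (ps : List Int × Int) x => (ps.1 ++ [ps.2 + x], ps.2 + x)) ([0], 0)).1.getD (i + e) 0
              - (arr.foldl (fun (ps : List Int × Int) x => (ps.1 ++ [ps.2 + x], ps.2 + x)) ([0], 0)).1.getD (i + e / 2) 0) = true)
      · have hsome : innerA arr e 0 = some e := by
          rw [innerA_some_iff]
          exact (any_iff arr e he).mp hany
        rw [hsome, if_pos hany]
      · have hnone : innerA arr e 0 = none := by
          rcases innerA_cases arr e 0 with h | h
          · exfalso
            rw [innerA_some_iff] at h
            exact hany ((any_iff arr e he).mpr h)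
          · exact h
        rw [hnone, if_neg hany]
        exact ih (e - 2) (by omega) (by omega)
    · rw [if_neg hpos, if_neg hpos]

-- ===== VERDICT (by name: the statement is the Claim_ definition above) =====
theorem solution_spec : Claim_equal_solution := by
  intro arr _
  unfold Spec_solution solution solution_alt
  show outerA arr (if arr.length % 2 = 1 then arr.length - 1 else arr.length)
      = outerB (arr.foldl (fun (ps : List Int × Int) x => (ps.1 ++ [ps.2 + x], ps.2 + x)) ([0], 0)).1
          arr.length (if arr.length % 2 = 0 then arr.length else arr.length - 1)
  have hpar : (if arr.length % 2 = 0 then arr.length else arr.length - 1)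
      = (if arr.length % 2 = 1 then arr.length - 1 else arr.length) := by
    rcases Nat.mod_two_eq_zero_or_one arr.length with h | h <;> simp [h]
  rw [hpar]
  exact outer_eq arr _ (by split <;> omega)
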